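-- pv_equiv track=rewrite | github.com/orangeshop/boj | 프로그래머스/lv0/120850. 문자열 정렬하기 （1）/문자열 정렬하기 （1）.py | solution
-- ===== SOURCE A (Python) =====
-- def solution(my_string):
--     answer = []
--
--     for i in range(len(my_string)):
--         if(my_string[i] == "1"):
--             answer.append(1)
--         elif(my_string[i] == "2"):
--             answer.append(2)
--         elif(my_string[i] == "3"):
--             answer.append(3)
--         elif(my_string[i] == "4"):
--             answer.append(4)
--         elif(my_string[i] == "5"):
--             answer.append(5)
--         elif(my_string[i] == "6"):
--             answer.append(6)
--         elif(my_string[i] == "7"):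
--             answer.append(7)
--         elif(my_string[i] == "8"):
--             answer.append(8)
--         elif(my_string[i] == "9"):
--             answer.append(9)
--         elif(my_string[i] == "0"):
--             answer.append(0)
--
--     answer.sort()
--     return answer
-- ===== SOURCE B (Python) =====
-- def solution(my_string):
--     counts = [0] * 10
--     for ch in my_string:
--         if '0' <= ch <= '9':
--             counts[ord(ch) - 48] += 1
--     return [d for d in range(10) for _ in range(counts[d])]
-- ===== Notes on version B (the rewrite author's own statement) =====
-- stated objective: faster
-- what changed: Replaces the 10-way if/elif chain plus final sort with a single-pass counting sort: one range test per character fills 10 buckets, and the sorted output is emitted bucket by bucket.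
import Mathlib
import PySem

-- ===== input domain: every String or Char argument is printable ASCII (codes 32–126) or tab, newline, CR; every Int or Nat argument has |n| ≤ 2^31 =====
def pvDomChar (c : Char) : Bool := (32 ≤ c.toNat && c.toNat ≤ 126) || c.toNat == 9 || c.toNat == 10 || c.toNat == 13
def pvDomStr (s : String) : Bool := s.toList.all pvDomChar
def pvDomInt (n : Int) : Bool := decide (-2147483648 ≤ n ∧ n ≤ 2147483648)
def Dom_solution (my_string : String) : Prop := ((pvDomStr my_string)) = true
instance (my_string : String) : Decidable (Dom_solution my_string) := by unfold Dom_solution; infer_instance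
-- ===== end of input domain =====

-- B replaces the if/elif chain + sort with a one-pass counting sort over 10 digit buckets (faster).

-- ===== PORT A =====
-- A-side helper: the body of A's for-loop (the if/elif chain), verbatim
def aStep (answer : List Int) (c : Char) : List Int :=
  if c = '1' then answer ++ [1]
  else if c = '2' then answer ++ [2]
  else if c = '3' then answer ++ [3]
  else if c = '4' then answer ++ [4]
  else if c = '5' then answer ++ [5]
  else if c = '6' then answer ++ [6]
  else if c = '7' then answer ++ [7]
  else if c = '8' then answer ++ [8]
  else if c = '9' then answer ++ [9]
  else if c = '0' then answer ++ [0]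
  else answer

def solution (my_string : String) : List Int :=
  let answer : List Int := (PySem.List.pyRange 0 (PySem.Str.len my_string) 1).foldl
    (fun answer i => aStep answer (PySem.List.pyGetD my_string.toList i ' ')) []
  PySem.List.sorted answer (fun x => x) false

-- ===== PORT B =====
def solution_alt (my_string : String) : List Int :=
  let counts : List Nat := my_string.toList.foldl
    (fun counts ch =>
      if '0' ≤ ch ∧ ch ≤ '9' then counts.set (ch.toNat - 48) (counts.getD (ch.toNat - 48) 0 + 1)
      else counts)
    (List.replicate 10 0)
  (List.range 10).flatMap (fun d => List.replicate (counts.getD d 0) ((d : Nat) : Int))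

-- ===== PRECONDITION & SPEC =====
def Spec_solution (my_string : String) (out : List Int) : Prop := out = solution_alt my_string
instance (my_string : String) (out : List Int) : Decidable (Spec_solution my_string out) := by unfold Spec_solution; infer_instance

-- ===== CLAIM (what is proved, stated in full; the proofs are below) =====
def Claim_equal_solution : Prop := ∀ (my_string : String), Dom_solution my_string → Spec_solution my_string (solution my_string)

-- ===== LEMMAS AND PROOFS =====

-- the digit predicate and value, as proof-side shorthands
def isDig (c : Char) : Bool := decide ('0' ≤ c ∧ c ≤ '9')
def dval (c : Char) : Int := (c.toNat : Int) - 48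

theorem isDig_iff (c : Char) : isDig c = true ↔ 48 ≤ c.toNat ∧ c.toNat ≤ 57 := by
  simp [isDig, Char.le_def]
  constructor
  · rintro ⟨ha, hb⟩
    have h1 := UInt32.le_iff_toNat_le.mp ha
    have h2 := UInt32.le_iff_toNat_le.mp hb
    have e0 : (48:UInt32).toNat = 48 := by decide
    have e9 : (57:UInt32).toNat = 57 := by decide
    have ecv : c.val.toNat = c.toNat := rfl
    exact ⟨by omega, by omega⟩
  · rintro ⟨ha, hb⟩
    constructor
    · apply UInt32.le_iff_toNat_le.mpr
      have e0 : (48:UInt32).toNat = 48 := by decide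
      have ecv : c.val.toNat = c.toNat := rfl
      omega
    · apply UInt32.le_iff_toNat_le.mpr
      have e9 : (57:UInt32).toNat = 57 := by decide
      have ecv : c.val.toNat = c.toNat := rfl
      omega

theorem char_eq_of_toNat (c d : Char) (h : c.toNat = d.toNat) : c = d := by
  apply Char.ext
  apply UInt32.toBitVec_inj.mp
  apply BitVec.toNat_inj.mp
  exact h

theorem isDig_false (c : Char) (h0 : c ≠ '0') (h1 : c ≠ '1') (h2 : c ≠ '2')
    (h3 : c ≠ '3') (h4 : c ≠ '4') (h5 : c ≠ '5') (h6 : c ≠ '6') (h7 : c ≠ '7')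
    (h8 : c ≠ '8') (h9 : c ≠ '9') : isDig c = false := by
  cases h : isDig c
  · rfl
  · exfalso
    obtain ⟨hlo, hhi⟩ := (isDig_iff c).mp h
    interval_cases hn : c.toNat
    · exact h0 (char_eq_of_toNat _ _ (by rw [hn]; rfl))
    · exact h1 (char_eq_of_toNat _ _ (by rw [hn]; rfl))
    · exact h2 (char_eq_of_toNat _ _ (by rw [hn]; rfl))
    · exact h3 (char_eq_of_toNat _ _ (by rw [hn]; rfl))
    · exact h4 (char_eq_of_toNat _ _ (by rw [hn]; rfl))
    · exact h5 (char_eq_of_toNat _ _ (by rw [hn]; rfl))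
    · exact h6 (char_eq_of_toNat _ _ (by rw [hn]; rfl))
    · exact h7 (char_eq_of_toNat _ _ (by rw [hn]; rfl))
    · exact h8 (char_eq_of_toNat _ _ (by rw [hn]; rfl))
    · exact h9 (char_eq_of_toNat _ _ (by rw [hn]; rfl))

-- A's loop body is 'if digit, append its value'
lemma a_body_eq : aStep
    = (fun (answer : List Int) (c : Char) => if isDig c then answer ++ [dval c] else answer) := by
  funext ans c
  unfold aStep
  by_cases h1 : c = '1'
  · subst h1
    have hT : isDig '1' = true := by decide
    have hV : dval '1' = 1 := by decide
    simp [hT, hV]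
  by_cases h2 : c = '2'
  · subst h2
    have hT : isDig '2' = true := by decide
    have hV : dval '2' = 2 := by decide
    simp [hT, hV, h1]
  by_cases h3 : c = '3'
  · subst h3
    have hT : isDig '3' = true := by decide
    have hV : dval '3' = 3 := by decide
    simp [hT, hV, h1, h2]
  by_cases h4 : c = '4'
  · subst h4
    have hT : isDig '4' = true := by decide
    have hV : dval '4' = 4 := by decide
    simp [hT, hV, h1, h2, h3]
  by_cases h5 : c = '5'
  · subst h5
    have hT : isDig '5' = true := by decide
    have hV : dval '5' = 5 := by decide
    simp [hT, hV, h1, h2, h3, h4]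
  by_cases h6 : c = '6'
  · subst h6
    have hT : isDig '6' = true := by decide
    have hV : dval '6' = 6 := by decide
    simp [hT, hV, h1, h2, h3, h4, h5]
  by_cases h7 : c = '7'
  · subst h7
    have hT : isDig '7' = true := by decide
    have hV : dval '7' = 7 := by decide
    simp [hT, hV, h1, h2, h3, h4, h5, h6]
  by_cases h8 : c = '8'
  · subst h8
    have hT : isDig '8' = true := by decide
    have hV : dval '8' = 8 := by decide
    simp [hT, hV, h1, h2, h3, h4, h5, h6, h7]
  by_cases h9 : c = '9'
  · subst h9
    have hT : isDig '9' = true := by decide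
    have hV : dval '9' = 9 := by decide
    simp [hT, hV, h1, h2, h3, h4, h5, h6, h7, h8]
  by_cases h0 : c = '0'
  · subst h0
    have hT : isDig '0' = true := by decide
    have hV : dval '0' = 0 := by decide
    simp [hT, hV, h1, h2, h3, h4, h5, h6, h7, h8, h9]
  rw [if_neg h1, if_neg h2, if_neg h3, if_neg h4, if_neg h5, if_neg h6, if_neg h7, if_neg h8,
    if_neg h9, if_neg h0, if_neg (by simp [isDig_false c h0 h1 h2 h3 h4 h5 h6 h7 h8 h9])]

-- A's result is the sorted list of digit values in order of appearance
lemma solution_eq_sorted (s : String) :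
    solution s = PySem.List.sorted ((s.toList.filter isDig).map dval) (fun x => x) false := by
  simp only [solution]
  rw [show PySem.Str.len s = (s.toList.length : Int) from by simp]
  rw [PySem.List.foldl_pyRange_zero_pyGetD' s.toList ' ' aStep []]
  rw [a_body_eq, PySem.List.foldl_append_if isDig dval]
  rfl

-- B's counts invariant: bucket d holds its starting value plus the number of characters for digit d
lemma counts_getD (l : List Char) (c0 : List Nat) (h : c0.length = 10) (d : Nat) (hd : d < 10) :
    (l.foldl (fun counts ch =>
      if '0' ≤ ch ∧ ch ≤ '9' then counts.set (ch.toNat - 48) (counts.getD (ch.toNat - 48) 0 + 1)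
      else counts) c0).getD d 0
    = c0.getD d 0 + l.countP (fun c => isDig c && (c.toNat - 48 == d)) := by
  induction l generalizing c0 with
  | nil => simp
  | cons ch l ih =>
    simp only [List.foldl_cons, List.countP_cons]
    by_cases hch : '0' ≤ ch ∧ ch ≤ '9'
    · rw [if_pos hch]
      have hdig : isDig ch = true := by simp [isDig, hch]
      obtain ⟨hlo, hhi⟩ := (isDig_iff ch).mp hdig
      have hk : ch.toNat - 48 < 10 := by omega
      rw [ih _ (by rw [List.length_set]; exact h)]
      by_cases hkd : ch.toNat - 48 = d
      · subst hkd
        rw [List.getD_eq_getElem?_getD, List.getElem?_set_self (by omega)]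
        simp [hdig, List.getD_eq_getElem?_getD]
        omega
      · rw [List.getD_eq_getElem?_getD, List.getElem?_set_ne hkd]
        simp [hdig, hkd, List.getD_eq_getElem?_getD]
    · rw [if_neg hch]
      have hdig : isDig ch = false := by simp [isDig, hch]
      rw [ih _ h]
      simp [hdig]

-- a flatMap-congruence helper
lemma flatMap_congr_mem {α β : Type} (xs : List α) (f g : α → List β)
    (h : ∀ x ∈ xs, f x = g x) : xs.flatMap f = xs.flatMap g := by
  induction xs with
  | nil => rfl
  | cons a xs ih =>
    simp only [List.flatMap_cons]
    rw [h a (by simp), ih (fun x hx => h x (by simp [hx]))]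

-- B's result written with explicit character counts
lemma alt_eq (s : String) :
    solution_alt s = (List.range 10).flatMap
      (fun d => List.replicate (s.toList.countP (fun c => isDig c && (c.toNat - 48 == d))) ((d : Nat) : Int)) := by
  unfold solution_alt
  apply flatMap_congr_mem
  intro d hd
  have hd10 : d < 10 := List.mem_range.mp hd
  rw [counts_getD s.toList _ (by simp) d hd10]
  simp [List.getD_eq_getElem?_getD, hd10]
  interval_cases d <;> rfl

-- the bucket-by-bucket output is weakly increasing
lemma flat_pairwise (m : Nat → Nat) (n : Nat) :
    ((List.range n).flatMap (fun d => List.replicate (m d) ((d : Nat) : Int))).Pairwise (· ≤ ·) := by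
  induction n with
  | zero => simp
  | succ n ih =>
    rw [List.range_succ, List.flatMap_append]
    apply List.pairwise_append.mpr
    refine ⟨ih, ?_, ?_⟩
    · simp only [List.flatMap_cons, List.flatMap_nil, List.append_nil]
      exact List.pairwise_replicate.mpr (Or.inr le_rfl)
    · intro x hx y hy
      obtain ⟨d, hdmem, hdx⟩ := List.mem_flatMap.mp hx
      have hxd : x = (d : Int) := List.eq_of_mem_replicate hdx
      have hyd : y = (n : Int) := by
        simp only [List.flatMap_cons, List.flatMap_nil, List.append_nil] at hy
        exact List.eq_of_mem_replicate hy
      have : d < n := List.mem_range.mp hdmem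
      subst hxd; subst hyd
      exact_mod_cast Nat.le_of_lt this

-- count of any value in B's output
lemma count_flat (m : Nat → Nat) (n : Nat) (v : Int) :
    ((List.range n).flatMap (fun d => List.replicate (m d) ((d : Nat) : Int))).count v
    = if 0 ≤ v ∧ v < (n : Int) then m v.toNat else 0 := by
  induction n with
  | zero =>
      rw [if_neg (by omega)]
      simp
  | succ n ih =>
    rw [List.range_succ, List.flatMap_append]
    simp only [List.count_append, ih, List.flatMap_cons, List.flatMap_nil, List.append_nil,
      List.count_replicate]
    by_cases hv : 0 ≤ v ∧ v < (n : Int)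
    · have h1 : ¬ ((n : Int) == v) = true := by simp; omega
      have h2 : 0 ≤ v ∧ v < (n : Int) + 1 := ⟨hv.1, by omega⟩
      rw [if_pos hv, if_neg (by simp [h1]), if_pos (by push_cast; omega)]
      omega
    · by_cases hv' : v = (n : Int)
      · subst hv'
        rw [if_neg hv, if_pos (by simp), if_pos (by push_cast; omega)]
        simp
      · have h1 : ¬ ((n : Int) == v) = true := by simp; omega
        rw [if_neg hv, if_neg (by simp [h1]), if_neg (by push_cast; omega)]

-- B's output is a permutation of A's pre-sort digit list
lemma flat_perm (s : String) :
    ((List.range 10).flatMap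
      (fun d => List.replicate (s.toList.countP (fun c => isDig c && (c.toNat - 48 == d))) ((d : Nat) : Int))).Perm
    ((s.toList.filter isDig).map dval) := by
  apply List.perm_iff_count.mpr
  intro v
  rw [count_flat]
  push_cast
  rw [List.count_eq_countP, List.countP_map, List.countP_filter]
  by_cases hv : 0 ≤ v ∧ v < 10
  · rw [if_pos hv]
    apply List.countP_congr
    intro c _
    simp only [Function.comp]
    cases hdig : isDig c
    · simp
    · obtain ⟨hlo, hhi⟩ := (isDig_iff c).mp hdig
      simp only [Bool.and_true, Bool.true_and]
      simp only [dval, beq_iff_eq]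
      constructor <;> intro h <;> omega
  · rw [if_neg hv]
    symm
    apply List.countP_eq_zero.mpr
    intro c _
    simp only [Function.comp]
    cases hdig : isDig c
    · simp
    · obtain ⟨hlo, hhi⟩ := (isDig_iff c).mp hdig
      simp only [Bool.and_true]
      simp only [dval, beq_iff_eq]
      omega

-- ===== VERDICT (by name: the statement is the Claim_ definition above) =====
theorem solution_spec : Claim_equal_solution := by
  intro s _
  show solution s = solution_alt s
  rw [solution_eq_sorted, alt_eq]
  exact PySem.List.sorted_id_eq_of_perm_of_pairwise _ _ (flat_perm s) (flat_pairwise _ 10)
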